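-- pv_equiv track=rewrite | github.com/esverd/plottrbot-python | src/plottrbot/core/draw_session_logger.py | _resolve_line_index
-- ===== SOURCE A (Python) =====
-- def _resolve_line_index(command_index: int, command_to_line_index: list[int]) -> int | None:
--     if not command_to_line_index:
--         return None
--     if command_index < 0:
--         return None
--     safe_index = min(command_index, len(command_to_line_index) - 1)
--     for idx in range(safe_index, -1, -1):
--         line_index = command_to_line_index[idx]
--         if line_index >= 0:
--             return line_index
--     return None
-- ===== SOURCE B (Python) =====
-- def _resolve_line_index(command_index: int, command_to_line_index: list[int]) -> int | None:
--     if not command_to_line_index: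
--         return None
--     if command_index < 0:
--         return None
--     safe_index = min(command_index, len(command_to_line_index) - 1)
--     result = None
--     for line_index in command_to_line_index[:safe_index + 1]:
--         if line_index >= 0:
--             result = line_index
--     return result
-- ===== Notes on version B (the rewrite author's own statement) =====
-- stated objective: alternative
-- what changed: Replaced the backward index scan with early return by a forward accumulator pass over the prefix slice that keeps the last non-negative value seen.
import Mathlib
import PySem

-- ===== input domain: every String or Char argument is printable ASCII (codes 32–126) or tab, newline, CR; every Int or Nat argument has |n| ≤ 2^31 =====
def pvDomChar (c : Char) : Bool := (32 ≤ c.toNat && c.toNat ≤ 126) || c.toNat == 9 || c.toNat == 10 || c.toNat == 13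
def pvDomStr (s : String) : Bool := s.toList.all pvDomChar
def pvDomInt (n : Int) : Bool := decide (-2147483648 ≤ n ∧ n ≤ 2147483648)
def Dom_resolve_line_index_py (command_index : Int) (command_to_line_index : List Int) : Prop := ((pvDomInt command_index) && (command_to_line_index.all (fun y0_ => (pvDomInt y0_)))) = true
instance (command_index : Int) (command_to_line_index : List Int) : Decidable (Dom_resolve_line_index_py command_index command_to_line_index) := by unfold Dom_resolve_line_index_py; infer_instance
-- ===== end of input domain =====

-- B replaces A's backward early-return index scan by a forward accumulator pass over the
-- prefix slice, keeping the last non-negative value seen (objective: alternative decomposition).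

-- ===== PORT A =====
-- A's loop 'for idx in range(safe_index, -1, -1)' with early return, as a down-counting recursion;
-- indexing via pyGet? (the none branch is Python's IndexError, unreachable since idx ≤ safe_index < len).
def pvLoopA (xs : List Int) : Nat → Option Int
  | 0 =>
    match PySem.List.pyGet? xs (0 : Int) with
    | some line_index => if line_index ≥ 0 then some line_index else none
    | none => none
  | i + 1 =>
    match PySem.List.pyGet? xs ((i : Int) + 1) with
    | some line_index => if line_index ≥ 0 then some line_index else pvLoopA xs i
    | none => none

def resolve_line_index_py (command_index : Int) (command_to_line_index : List Int) : Option Int :=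
  if command_to_line_index = [] then none
  else if command_index < 0 then none
  else
    let safe_index : Int := min command_index ((command_to_line_index.length : Int) - 1)
    pvLoopA command_to_line_index safe_index.toNat

-- ===== PORT B =====
def resolve_line_index_py_alt (command_index : Int) (command_to_line_index : List Int) : Option Int :=
  if command_to_line_index = [] then none
  else if command_index < 0 then none
  else
    let safe_index : Int := min command_index ((command_to_line_index.length : Int) - 1)
    (PySem.List.slice command_to_line_index (some 0) (some (safe_index + 1))).foldl
      (fun result line_index => if line_index ≥ 0 then some line_index else result) none

-- ===== PRECONDITION & SPEC =====
def Spec_resolve_line_index_py (command_index : Int) (command_to_line_index : List Int) (out : Option Int) : Prop := out = resolve_line_index_py_alt command_index command_to_line_index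
instance (command_index : Int) (command_to_line_index : List Int) (out : Option Int) : Decidable (Spec_resolve_line_index_py command_index command_to_line_index out) := by unfold Spec_resolve_line_index_py; infer_instance

-- ===== CLAIM (what is proved, stated in full; the proofs are below) =====
def Claim_equal_resolve_line_index_py : Prop := ∀ (command_index : Int) (command_to_line_index : List Int), Dom_resolve_line_index_py command_index command_to_line_index → Spec_resolve_line_index_py command_index command_to_line_index (resolve_line_index_py command_index command_to_line_index)

-- ===== LEMMAS AND PROOFS =====

-- backward first-hit scan over indices n..0 = forward last-hit fold over the (n+1)-prefix
theorem pvLoopA_eq_foldl_take (xs : List Int) (n : Nat) (hn : n < xs.length) :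
    pvLoopA xs n =
      (xs.take (n + 1)).foldl (fun result line_index => if line_index ≥ 0 then some line_index else result) none := by
  induction n with
  | zero =>
    have h0 : 0 < xs.length := hn
    rw [List.take_add_one]
    simp [pvLoopA, PySem.List.pyGet?_zero, List.getElem?_eq_getElem h0]
  | succ i ih =>
    have hi : i < xs.length := Nat.lt_of_succ_lt hn
    have hget : PySem.List.pyGet? xs ((i : Int) + 1) = some xs[i + 1] := by
      have := PySem.List.pyGet?_ofNat (xs := xs) (n := i + 1) hn
      simpa [Int.natCast_succ] using this
    rw [List.take_add_one, List.getElem?_eq_getElem hn]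
    simp only [pvLoopA, hget, List.foldl_append, Option.toList_some, List.foldl_cons, List.foldl_nil]
    by_cases hpos : xs[i + 1] ≥ 0
    · simp [hpos]
    · simp [hpos, ih hi]

-- ===== VERDICT (by name: the statement is the Claim_ definition above) =====
theorem resolve_line_index_py_spec : Claim_equal_resolve_line_index_py := by
  unfold Claim_equal_resolve_line_index_py
  intro ci xs _
  unfold Spec_resolve_line_index_py resolve_line_index_py resolve_line_index_py_alt
  by_cases hnil : xs = []
  · simp [hnil]
  · by_cases hneg : ci < 0
    · simp [hnil, hneg]
    · simp only [hnil, hneg, if_false]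
      have hlen : 0 < xs.length := List.length_pos_iff.mpr hnil
      set safe : Int := min ci ((xs.length : Int) - 1) with hsafe
      have hsnn : 0 ≤ safe := by
        have : 0 ≤ ci := not_lt.mp hneg
        simp only [hsafe, le_min_iff]
        constructor
        · exact this
        · omega
      have hslt : safe.toNat < xs.length := by omega
      have hcast : safe + 1 = ((safe.toNat + 1 : Nat) : Int) := by omega
      rw [hcast, PySem.List.slice_zero_start, PySem.List.slice_to_natCast]
      exact pvLoopA_eq_foldl_take xs safe.toNat hslt
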